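-- pv_equiv track=rewrite | github.com/amf75/PycharmProjects | NetAnalysis/Modules/network.py | netBlocks
-- ===== SOURCE A (Python) =====
-- import math
--
-- def netBlocks(sfield, afield):
--     subnetOnes = bin(int(sfield)).count("1")
--     nSubnet = int(math.pow(2, subnetOnes))
--     nBlocks = int(math.pow(2, 8 - subnetOnes))
--     listSubnetBlocks=[]
--     for i in range(0, nSubnet+1):
--         listSubnetBlocks.append(i * nBlocks)
--
--     isempty = (listSubnetBlocks and True) or False
--     a = min(x for x in listSubnetBlocks if x > int(afield))
--
--     subnetNetwork = [a-nBlocks, a - 1]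
--     return subnetNetwork
-- ===== SOURCE B (Python) =====
-- import math
--
-- def netBlocks(sfield, afield):
--     # round the address up to the next block boundary; its block is the range returned
--     subnetOnes = bin(int(sfield)).count("1")
--     nBlocks = int(math.pow(2, 8 - subnetOnes))
--     a = (int(afield) // nBlocks + 1) * nBlocks
--     return [a - nBlocks, a - 1]
-- ===== Notes on version B (the rewrite author's own statement) =====
-- stated objective: faster
-- what changed: Drops the list of all 2^popcount(sfield)+1 block boundaries and the min-scan; B rounds the address up to the next block boundary with one floor division. Pre_ restricts to the natural domain of non-negative addresses: on negative addresses A's clamp to the zero boundary is an artefact of its boundary list starting at 0, and B's floor-division value there is equally defensible.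
-- outside the precondition, e.g. on netBlocks('248', '-20'): A returns [-8, -1], B returns [-24, -17]
import Mathlib
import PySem

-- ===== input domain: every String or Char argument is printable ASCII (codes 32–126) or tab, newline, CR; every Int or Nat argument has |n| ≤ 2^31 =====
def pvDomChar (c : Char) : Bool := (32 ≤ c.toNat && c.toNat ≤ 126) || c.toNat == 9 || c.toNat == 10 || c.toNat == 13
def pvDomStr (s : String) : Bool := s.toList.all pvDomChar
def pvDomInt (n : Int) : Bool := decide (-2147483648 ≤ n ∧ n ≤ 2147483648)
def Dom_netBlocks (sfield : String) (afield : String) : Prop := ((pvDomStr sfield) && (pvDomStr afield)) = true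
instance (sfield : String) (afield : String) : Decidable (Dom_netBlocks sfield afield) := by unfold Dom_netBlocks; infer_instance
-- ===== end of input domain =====

-- B replaces A's list of all 2^popcount(sfield)+1 block boundaries and its min-scan by a single
-- floor division rounding the address up to the next boundary (objective: faster, asymptotic).

-- ===== PORT A =====
-- bin(int(sfield)).count("1") = PySem.Int.bitCount (popcount of |n|).
-- int(math.pow(2, 8 - subnetOnes)) is exactly 2^(8-subnetOnes) for subnetOnes ≤ 8 and
-- truncates the fraction to 0 for subnetOnes > 8 (floats 2^±k are exact for the k reachable here).
def netBlocks (sfield : String) (afield : String) : List Int :=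
  match PySem.Int.ofStr? sfield with
  | none => []            -- int(sfield) raises ValueError (excluded by Pre_)
  | some s =>
    let subnetOnes : Nat := PySem.Int.bitCount s
    let nSubnet : Int := 2 ^ subnetOnes
    let nBlocks : Int := if subnetOnes ≤ 8 then 2 ^ (8 - subnetOnes) else 0
    let listSubnetBlocks : List Int :=
      (PySem.List.pyRange 0 (nSubnet + 1) 1).foldl (fun acc i => acc ++ [i * nBlocks]) []
    -- (A's `isempty` is computed and never used)
    match PySem.Int.ofStr? afield with
    | none => []          -- int(afield) raises ValueError (excluded by Pre_)
    | some af =>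
      match PySem.List.min? (listSubnetBlocks.filter (fun x => decide (af < x))) (fun x => x) with
      | none => []        -- min() of empty generator raises ValueError (excluded by Pre_)
      | some a => [a - nBlocks, a - 1]

-- ===== PORT B =====
def netBlocks_alt (sfield : String) (afield : String) : List Int :=
  match PySem.Int.ofStr? sfield, PySem.Int.ofStr? afield with
  | some s, some af =>
    let subnetOnes : Nat := PySem.Int.bitCount s
    let nBlocks : Int := if subnetOnes ≤ 8 then 2 ^ (8 - subnetOnes) else 0
    let a : Int := (PySem.Int.floordiv af nBlocks + 1) * nBlocks
    [a - nBlocks, a - 1]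
  | _, _ => []            -- int() raises ValueError (excluded by Pre_)

-- ===== PRECONDITION & SPEC =====
-- Pre_ excludes the inputs on which A raises (unparseable int strings; addresses with no boundary
-- above them, where min() runs on an empty generator) and restricts the address to the natural
-- domain 0 ≤ af: on negative addresses A's clamp to the zero boundary is an artefact of its
-- boundary list starting at 0, and B's floor-division value there is equally defensible.
def Pre_netBlocks (sfield : String) (afield : String) : Prop :=
  (PySem.Int.ofStr? sfield).isSome ∧ (PySem.Int.ofStr? afield).isSome ∧
  0 ≤ (PySem.Int.ofStr? afield).getD 0 ∧
  (PySem.Int.ofStr? afield).getD 0 <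
    2 ^ (PySem.Int.bitCount ((PySem.Int.ofStr? sfield).getD 0)) *
      (if PySem.Int.bitCount ((PySem.Int.ofStr? sfield).getD 0) ≤ 8
       then (2 : Int) ^ (8 - PySem.Int.bitCount ((PySem.Int.ofStr? sfield).getD 0)) else 0)
instance (sfield : String) (afield : String) : Decidable (Pre_netBlocks sfield afield) := by
  unfold Pre_netBlocks; infer_instance

def pvWitness_netBlocks : String × String := ("248", "77")

def Spec_netBlocks (sfield : String) (afield : String) (out : List Int) : Prop := out = netBlocks_alt sfield afield
instance (sfield : String) (afield : String) (out : List Int) : Decidable (Spec_netBlocks sfield afield out) := by unfold Spec_netBlocks; infer_instance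

-- ===== CLAIM (what is proved, stated in full; the proofs are below) =====
def Claim_equal_netBlocks : Prop := ∀ (sfield : String) (afield : String), Dom_netBlocks sfield afield → Pre_netBlocks sfield afield → Spec_netBlocks sfield afield (netBlocks sfield afield)

-- ===== LEMMAS AND PROOFS =====

-- min of a list whose head is a lower bound is the head
lemma min?_cons_of_le (x : Int) (t : List Int) (h : ∀ y ∈ t, x ≤ y) :
    PySem.List.min? (x :: t) (fun y => y) = some x := by
  rw [PySem.List.min?_id_cons]
  congr 1
  rcases PySem.List.foldl_min_mem t x with hm | hm
  · exact hm
  · exact le_antisymm (PySem.List.foldl_min_le t x).1 (h _ hm)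

-- filter of a monotone-true predicate over range N keeps exactly the suffix from i0
lemma filter_range_suffix (N i0 : Nat) (p : Nat → Bool)
    (hle : i0 ≤ N) (h1 : ∀ k, k < i0 → p k = false) (h2 : ∀ k, i0 ≤ k → p k = true) :
    (List.range N).filter p = (List.range (N - i0)).map (i0 + ·) := by
  have hN : N = i0 + (N - i0) := by omega
  rw [hN, List.range_add, List.filter_append]
  have e1 : (List.range i0).filter p = [] := by
    rw [List.filter_eq_nil_iff]; intro k hk
    simp only [List.mem_range] at hk
    simp [h1 k hk]
  have e2 : ((List.range (N - i0)).map (i0 + ·)).filter p = (List.range (N - i0)).map (i0 + ·) := by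
    rw [List.filter_eq_self]; intro k hk
    simp only [List.mem_map, List.mem_range] at hk
    obtain ⟨j, _, rfl⟩ := hk
    exact h2 _ (Nat.le_add_right _ _)
  rw [e1, e2, List.nil_append]
  have h3 : i0 + (N - i0) - i0 = N - i0 := by omega
  rw [h3]

theorem netBlocks_spec : Claim_equal_netBlocks := by
  unfold Claim_equal_netBlocks
  intro sfield afield _ hpre
  obtain ⟨hs, ha, haf0, hlt⟩ := hpre
  unfold Spec_netBlocks netBlocks netBlocks_alt
  obtain ⟨s, hs'⟩ := Option.isSome_iff_exists.mp hs
  obtain ⟨af, ha'⟩ := Option.isSome_iff_exists.mp ha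
  rw [hs'] at hlt ⊢
  rw [ha'] at hlt haf0 ⊢
  simp only [Option.getD_some] at hlt haf0
  simp only
  set ones : Nat := PySem.Int.bitCount s with hones
  set nB : Int := if ones ≤ 8 then (2:Int) ^ (8 - ones) else 0 with hnB
  have h8 : ones ≤ 8 := by
    by_contra h8
    rw [hnB, if_neg h8] at hlt
    omega
  have hnBval : nB = (2:Int) ^ (8 - ones) := by rw [hnB, if_pos h8]
  have hnBpos : 0 < nB := by rw [hnBval]; positivity
  rw [PySem.List.foldl_append_singleton_eq_map, List.nil_append, PySem.List.pyRange_one]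
  have hNS : ((2:Int) ^ ones + 1 - 0).toNat = 2 ^ ones + 1 := by
    rw [Int.sub_zero]
    have h : ((2:Int) ^ ones + 1) = ((2 ^ ones + 1 : Nat) : Int) := by push_cast; ring
    rw [h, Int.toNat_natCast]
  rw [hNS]
  set i0 : Nat := (PySem.Int.floordiv af nB + 1).toNat with hi0
  have hfd_nonneg : 0 ≤ PySem.Int.floordiv af nB := by
    rw [PySem.Int.floordiv_eq_ediv_of_pos hnBpos]
    exact Int.ediv_nonneg haf0 (le_of_lt hnBpos)
  have hi0cast : (i0 : Int) = PySem.Int.floordiv af nB + 1 := by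
    rw [hi0, Int.toNat_of_nonneg (by omega)]
  have hi0le : i0 ≤ 2 ^ ones := by
    have hq : PySem.Int.floordiv af nB < 2 ^ ones := by
      rw [PySem.Int.floordiv_lt_iff_lt_mul hnBpos]
      calc af < 2 ^ ones * nB := hlt
        _ = ((2 ^ ones : Nat) : Int) * nB := by push_cast; ring
    have h2 : (i0 : Int) ≤ ((2 ^ ones : Nat) : Int) := by
      rw [hi0cast]; push_cast; omega
    exact_mod_cast h2
  have h1 : ∀ k : Nat, k < i0 → (decide (af < (0 + (k:Int)) * nB)) = false := by
    intro k hk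
    have hk' : (k : Int) ≤ PySem.Int.floordiv af nB := by
      have hki : (k : Int) < (i0 : Int) := by exact_mod_cast hk
      rw [hi0cast] at hki; omega
    have hle := (PySem.Int.le_floordiv_iff_mul_le hnBpos).mp hk'
    simp only [zero_add, decide_eq_false_iff_not]; omega
  have hbase : af < (i0 : Int) * nB := by
    rw [hi0cast]
    exact (PySem.Int.floordiv_lt_iff_lt_mul hnBpos
      (q := PySem.Int.floordiv af nB + 1)).mp (by omega)
  have h2 : ∀ k : Nat, i0 ≤ k → (decide (af < (0 + (k:Int)) * nB)) = true := by
    intro k hk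
    have hik : (i0 : Int) ≤ (k : Int) := by exact_mod_cast hk
    have hmul : (i0 : Int) * nB ≤ (k : Int) * nB := by nlinarith
    simp only [zero_add, decide_eq_true_eq]; omega
  rw [List.filter_map, List.filter_map]
  simp only [Function.comp_def]
  rw [filter_range_suffix (2 ^ ones + 1) i0 _ (by omega) h1 h2]
  have hlen : 2 ^ ones + 1 - i0 = (2 ^ ones - i0) + 1 := by omega
  rw [List.map_map]
  simp only [Function.comp_def]
  rw [hlen, List.range_succ_eq_map, List.map_cons, List.map_cons]
  rw [min?_cons_of_le _ _ ?tail]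
  case tail =>
    intro y hy
    simp only [List.map_map, List.mem_map, List.mem_range] at hy
    obtain ⟨j, _, rfl⟩ := hy
    have hc : ((i0:Nat) : Int) ≤ ((i0 + Nat.succ j : Nat) : Int) := by push_cast; omega
    simp only [Function.comp_def, Nat.add_zero]
    nlinarith
  have hhead : (0 + ((i0 + 0 : Nat) : Int)) * nB = (PySem.Int.floordiv af nB + 1) * nB := by
    rw [zero_add, Nat.add_zero, hi0cast]
  simp only [Nat.add_zero] at hhead ⊢
  simp only [hhead]
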